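-- pv_equiv track=rewrite | github.com/i-navneet/BejeweledAI | bejeweledSimulation.py | gridSolve
-- ===== SOURCE A (Python) =====
-- def gridSolve(grid, n):
--     for i in range(n):
--         for j in range(n):
--             temp = 0
--             k = j
--             while(k < n and grid[i][j] == grid[i][k] and grid[i][k] >= 0):
--                 temp = temp + 1
--                 k = k + 1
--             if(temp >= 3):
--                 for l in range(j, j + temp):
--                     grid[i][l] = -1
--             if(temp == 3):
--                 return 10
--             elif(temp == 4):
--                 return 20
--             elif(temp >= 5):
--                 return 30
--     for i in range(n):
--         for j in range(n):
--             temp = 0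
--             k = j
--             while(k < n and grid[j][i] == grid[k][i] and grid[k][i] >= 0):
--                 temp = temp + 1
--                 k = k + 1
--             if(temp >= 3):
--                 for l in range(j, j + temp):
--                     grid[l][i] = -1
--             if(temp == 3):
--                 return 10
--             elif(temp == 4):
--                 return 20
--             elif(temp >= 5):
--                 return 30
--     return 0
-- ===== SOURCE B (Python) =====
-- def gridSolve(grid, n):
--     # Run-jumping scan: rows then columns; one pass per line over maximal runs.
--     size = max(n, 0)
--
--     def find_run(line):
--         # first maximal run (start, length) with value >= 0 and length >= 3
--         s = 0
--         while s < len(line):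
--             v = line[s]
--             e = s + 1
--             while e < len(line) and line[e] == v:
--                 e += 1
--             if v >= 0 and e - s >= 3:
--                 return s, e - s
--             s = e
--         return None
--
--     for i in range(size):
--         hit = find_run([grid[i][j] for j in range(size)])
--         if hit is not None:
--             s, L = hit
--             for l in range(s, s + L):
--                 grid[i][l] = -1
--             return 10 if L == 3 else 20 if L == 4 else 30
--     for i in range(size):
--         hit = find_run([grid[j][i] for j in range(size)])
--         if hit is not None:
--             s, L = hit
--             for l in range(s, s + L):
--                 grid[l][i] = -1
--             return 10 if L == 3 else 20 if L == 4 else 30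
--     return 0
-- ===== Notes on version B (the rewrite author's own statement) =====
-- stated objective: alternative
-- what changed: A re-counts the run from every cell j with a nested while loop; B walks each line once, jumping maximal run to maximal run (inner index loops replaced by a run-jumping single pass per line), scoring the first run with value >= 0 and length >= 3, rows before columns.
-- outside the precondition, e.g. on gridSolve([[1, 1, 1, 2]], 5): A returns 10, B raises IndexError; on gridSolve([[1, 1, 1]], 3): A returns 10, B returns 10
import Mathlib
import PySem

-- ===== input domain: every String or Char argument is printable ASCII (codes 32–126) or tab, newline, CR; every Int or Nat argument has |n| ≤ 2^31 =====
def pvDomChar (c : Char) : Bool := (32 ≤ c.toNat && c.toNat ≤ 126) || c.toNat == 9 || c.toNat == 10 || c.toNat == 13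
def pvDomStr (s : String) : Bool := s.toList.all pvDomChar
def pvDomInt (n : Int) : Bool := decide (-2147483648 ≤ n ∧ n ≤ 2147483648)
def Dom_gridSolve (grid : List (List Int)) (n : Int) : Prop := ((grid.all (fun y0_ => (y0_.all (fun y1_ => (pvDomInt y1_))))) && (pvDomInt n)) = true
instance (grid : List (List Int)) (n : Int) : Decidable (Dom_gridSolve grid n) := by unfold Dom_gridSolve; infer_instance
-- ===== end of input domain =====

-- B replaces A's per-cell re-counting scan by a run-jumping single pass per line (alternative
-- decomposition). Python A mutates the triggering run's cells to -1 before returning; B performs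
-- the identical mutation; the equivalence proved here is about the RETURN value.

-- ===== PORT A =====
-- grid[i][j] for indices that are in range under Pre_ (Python raises out of range; Pre_ excludes that)
def pvCell (g : List (List Int)) (i j : Int) : Int :=
  (PySem.List.pyGet? ((PySem.List.pyGet? g i).getD []) j).getD 0

-- the row-phase while loop: temp = temp + 1; k = k + 1 while the condition holds
def whileRowA (g : List (List Int)) (n i j k temp : Int) : Nat → Int
  | 0 => temp
  | fuel + 1 =>
    if k < n ∧ pvCell g i j = pvCell g i k ∧ pvCell g i k ≥ 0 then
      whileRowA g n i j (k + 1) (temp + 1) fuel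
    else temp

-- the row-phase inner 'for j in range(n)' (mutation omitted: A returns immediately whenever it mutates)
def rowJLoopA (g : List (List Int)) (n i : Int) : List Int → Option Int
  | [] => none
  | j :: js =>
    let temp := whileRowA g n i j j 0 (n - j).toNat
    if temp = 3 then some 10
    else if temp = 4 then some 20
    else if temp ≥ 5 then some 30
    else rowJLoopA g n i js

def rowILoopA (g : List (List Int)) (n : Int) : List Int → Option Int
  | [] => none
  | i :: is =>
    match rowJLoopA g n i (PySem.List.pyRange 0 n 1) with
    | some r => some r
    | none => rowILoopA g n is

def whileColA (g : List (List Int)) (n i j k temp : Int) : Nat → Int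
  | 0 => temp
  | fuel + 1 =>
    if k < n ∧ pvCell g j i = pvCell g k i ∧ pvCell g k i ≥ 0 then
      whileColA g n i j (k + 1) (temp + 1) fuel
    else temp

def colJLoopA (g : List (List Int)) (n i : Int) : List Int → Option Int
  | [] => none
  | j :: js =>
    let temp := whileColA g n i j j 0 (n - j).toNat
    if temp = 3 then some 10
    else if temp = 4 then some 20
    else if temp ≥ 5 then some 30
    else colJLoopA g n i js

def colILoopA (g : List (List Int)) (n : Int) : List Int → Option Int
  | [] => none
  | i :: is =>
    match colJLoopA g n i (PySem.List.pyRange 0 n 1) with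
    | some r => some r
    | none => colILoopA g n is

def gridSolve (grid : List (List Int)) (n : Int) : Int :=
  match rowILoopA grid n (PySem.List.pyRange 0 n 1) with
  | some r => r
  | none =>
    match colILoopA grid n (PySem.List.pyRange 0 n 1) with
    | some r => r
    | none => 0

-- ===== PORT B =====
-- inner while of find_run: extend e while line[e] == v
def growB (line : List Int) (v e : Int) : Nat → Int
  | 0 => e
  | fuel + 1 =>
    if e < (line.length : Int) ∧ (PySem.List.pyGet? line e).getD 0 = v then
      growB line v (e + 1) fuel
    else e

-- find_run: jump run by run; first maximal run with v >= 0 and length >= 3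
def findRunB (line : List Int) (s : Int) : Nat → Option (Int × Int)
  | 0 => none
  | fuel + 1 =>
    if s < (line.length : Int) then
      let v := (PySem.List.pyGet? line s).getD 0
      let e := growB line v (s + 1) line.length
      if v ≥ 0 ∧ e - s ≥ 3 then some (s, e - s) else findRunB line e fuel
    else none

def rowLineB (g : List (List Int)) (size i : Int) : List Int :=
  (PySem.List.pyRange 0 size 1).map (fun j => pvCell g i j)

def colLineB (g : List (List Int)) (size i : Int) : List Int :=
  (PySem.List.pyRange 0 size 1).map (fun j => pvCell g j i)

def rowLoopB (g : List (List Int)) (size : Int) : List Int → Option Int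
  | [] => none
  | i :: is =>
    match findRunB (rowLineB g size i) 0 (rowLineB g size i).length with
    | some (_, L) => some (if L = 3 then 10 else if L = 4 then 20 else 30)
    | none => rowLoopB g size is

def colLoopB (g : List (List Int)) (size : Int) : List Int → Option Int
  | [] => none
  | i :: is =>
    match findRunB (colLineB g size i) 0 (colLineB g size i).length with
    | some (_, L) => some (if L = 3 then 10 else if L = 4 then 20 else 30)
    | none => colLoopB g size is

-- body of Source B after 'size = max(n, 0)', with size passed as a parameter
def altGoB (grid : List (List Int)) (size : Int) : Int :=
  match rowLoopB grid size (PySem.List.pyRange 0 size 1) with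
  | some r => r
  | none =>
    match colLoopB grid size (PySem.List.pyRange 0 size 1) with
    | some r => r
    | none => 0

def gridSolve_alt (grid : List (List Int)) (n : Int) : Int :=
  altGoB grid (max n 0)

-- ===== PRECONDITION & SPEC =====
-- Pre_ excludes grids lacking a full n×n top-left prefix: there Python A in general raises
-- IndexError, though on some such inputs A (and B) can return before reaching a missing cell
-- (examples cited in claim.json).
def Pre_gridSolve (grid : List (List Int)) (n : Int) : Prop :=
  n ≤ (grid.length : Int) ∧ ∀ r ∈ grid.take n.toNat, n ≤ (r.length : Int)

instance (grid : List (List Int)) (n : Int) : Decidable (Pre_gridSolve grid n) := by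
  unfold Pre_gridSolve; infer_instance

def pvWitness_gridSolve : List (List Int) × Int := ([[1, 1, 1], [0, 2, 0], [2, 0, 2]], 3)

def Spec_gridSolve (grid : List (List Int)) (n : Int) (out : Int) : Prop := out = gridSolve_alt grid n
instance (grid : List (List Int)) (n : Int) (out : Int) : Decidable (Spec_gridSolve grid n out) := by
  unfold Spec_gridSolve; infer_instance

-- ===== CLAIM (what is proved, stated in full; the proofs are below) =====
def Claim_equal_gridSolve : Prop := ∀ (grid : List (List Int)) (n : Int), Dom_gridSolve grid n → Pre_gridSolve grid n → Spec_gridSolve grid n (gridSolve grid n)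

-- ===== LEMMAS AND PROOFS =====

-- generic versions of A's per-line scan, over an abstract line f : Int → Int
def gwA (f : Int → Int) (n v k temp : Int) : Nat → Int
  | 0 => temp
  | fuel + 1 =>
    if k < n ∧ v = f k ∧ f k ≥ 0 then gwA f n v (k + 1) (temp + 1) fuel else temp

def gsA (f : Int → Int) (n : Int) : List Int → Option Int
  | [] => none
  | j :: js =>
    let temp := gwA f n (f j) j 0 (n - j).toNat
    if temp = 3 then some 10
    else if temp = 4 then some 20
    else if temp ≥ 5 then some 30
    else gsA f n js

def lineOf (f : Int → Int) (n : Int) : List Int := (PySem.List.pyRange 0 n 1).map f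

lemma whileRowA_eq_gwA (g : List (List Int)) (n i j : Int) :
    ∀ (fuel : Nat) (k temp : Int),
      whileRowA g n i j k temp fuel = gwA (fun k => pvCell g i k) n (pvCell g i j) k temp fuel := by
  intro fuel
  induction fuel with
  | zero => intro k temp; simp [whileRowA, gwA]
  | succ m ih => intro k temp; simp [whileRowA, gwA, ih]

lemma whileColA_eq_gwA (g : List (List Int)) (n i j : Int) :
    ∀ (fuel : Nat) (k temp : Int),
      whileColA g n i j k temp fuel = gwA (fun k => pvCell g k i) n (pvCell g j i) k temp fuel := by
  intro fuel
  induction fuel with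
  | zero => intro k temp; simp [whileColA, gwA]
  | succ m ih => intro k temp; simp [whileColA, gwA, ih]

lemma rowJLoopA_eq_gsA (g : List (List Int)) (n i : Int) :
    ∀ js, rowJLoopA g n i js = gsA (fun k => pvCell g i k) n js := by
  intro js
  induction js with
  | nil => simp [rowJLoopA, gsA]
  | cons j js ih => simp [rowJLoopA, gsA, whileRowA_eq_gwA, ih]

lemma colJLoopA_eq_gsA (g : List (List Int)) (n i : Int) :
    ∀ js, colJLoopA g n i js = gsA (fun k => pvCell g k i) n js := by
  intro js
  induction js with
  | nil => simp [colJLoopA, gsA]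
  | cons j js ih => simp [colJLoopA, gsA, whileColA_eq_gwA, ih]

lemma length_lineOf (f : Int → Int) (n : Int) : (lineOf f n).length = n.toNat := by
  simp [lineOf, PySem.List.length_pyRange_one]

lemma get_lineOf (f : Int → Int) (n j : Int) (h0 : 0 ≤ j) (hj : j < n) :
    (PySem.List.pyGet? (lineOf f n) j).getD 0 = f j := by
  rw [PySem.List.pyGet?_of_nonneg _ h0]
  have hjn : j.toNat < ((n : Int) - 0).toNat := by omega
  simp only [lineOf, PySem.List.pyRange_one, List.getElem?_map, List.getElem?_range hjn,
    Option.map_some, Option.getD_some]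
  congr 1
  omega

lemma growB_spec (f : Int → Int) (n v : Int) :
    ∀ (gfuel : Nat) (e0 : Int), 0 ≤ e0 → e0 ≤ n → (n - e0).toNat ≤ gfuel →
      e0 ≤ growB (lineOf f n) v e0 gfuel ∧ growB (lineOf f n) v e0 gfuel ≤ n ∧
      (∀ k, e0 ≤ k → k < growB (lineOf f n) v e0 gfuel → f k = v) ∧
      (growB (lineOf f n) v e0 gfuel < n → f (growB (lineOf f n) v e0 gfuel) ≠ v) := by
  intro gfuel
  induction gfuel with
  | zero =>
    intro e0 h0 hn hf
    have he : e0 = n := by omega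
    simp only [growB]
    refine ⟨le_refl _, by omega, by omega, by omega⟩
  | succ m ih =>
    intro e0 h0 hn hf
    have hlen : (((lineOf f n).length : Int)) = n := by rw [length_lineOf]; omega
    simp only [growB]
    by_cases he : e0 < n
    · have hget : (PySem.List.pyGet? (lineOf f n) e0).getD 0 = f e0 := get_lineOf f n e0 h0 he
      by_cases hv : f e0 = v
      · rw [if_pos (by rw [hlen, hget]; exact ⟨he, hv⟩)]
        obtain ⟨h1, h2, h3, h4⟩ := ih (e0 + 1) (by omega) (by omega) (by omega)
        refine ⟨by omega, h2, ?_, h4⟩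
        intro k hk1 hk2
        rcases eq_or_lt_of_le hk1 with rfl | hlt
        · exact hv
        · exact h3 k (by omega) hk2
      · rw [if_neg (by rw [hlen, hget]; tauto)]
        exact ⟨le_refl _, hn, by omega, fun _ => hv⟩
    · rw [if_neg (by rw [hlen]; tauto)]
      exact ⟨le_refl _, hn, by omega, by omega⟩

lemma gwA_run (f : Int → Int) (n v s e : Int) (he : e ≤ n)
    (hrun : ∀ k, s ≤ k → k < e → f k = v) (hstop : e < n → f e ≠ v) (hv : 0 ≤ v) :
    ∀ (fuel : Nat) (k temp : Int), s ≤ k → k ≤ e → (n - k).toNat ≤ fuel →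
      gwA f n v k temp fuel = temp + (e - k) := by
  intro fuel
  induction fuel with
  | zero =>
    intro k temp hk1 hk2 hf
    have : k = e := by omega
    simp [gwA]; omega
  | succ m ih =>
    intro k temp hk1 hk2 hf
    simp only [gwA]
    rcases eq_or_lt_of_le hk2 with rfl | hlt
    · rw [if_neg]
      · omega
      · rintro ⟨hkn, hvv, -⟩
        exact hstop hkn hvv.symm
    · have hfk : f k = v := hrun k hk1 hlt
      rw [if_pos ⟨by omega, hfk.symm, by omega⟩]
      rw [ih (k + 1) (temp + 1) (by omega) (by omega) (by omega)]
      omega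

lemma gwA_neg (f : Int → Int) (n v : Int) (hv : v < 0) :
    ∀ (fuel : Nat) (k temp : Int), f k = v → gwA f n v k temp fuel = temp := by
  intro fuel k temp hk
  cases fuel with
  | zero => simp [gwA]
  | succ m =>
    simp only [gwA]
    rw [if_neg]
    rintro ⟨-, -, h⟩
    omega

lemma gsA_skip (f : Int → Int) (n v s e : Int) (hse : s ≤ e) (hen : e ≤ n)
    (hrun : ∀ k, s ≤ k → k < e → f k = v) (hstop : e < n → f e ≠ v)
    (hno : ¬(0 ≤ v ∧ 3 ≤ e - s)) :
    ∀ (m : Nat) (j : Int), s ≤ j → j ≤ e → (e - j).toNat ≤ m →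
      gsA f n (PySem.List.pyRange j n 1) = gsA f n (PySem.List.pyRange e n 1) := by
  intro m
  induction m with
  | zero =>
    intro j hj1 hj2 hjm
    have : j = e := by omega
    rw [this]
  | succ m ih =>
    intro j hj1 hj2 hjm
    rcases eq_or_lt_of_le hj2 with rfl | hlt
    · rfl
    · have hjn : j < n := by omega
      rw [PySem.List.pyRange_one_cons hjn]
      have hfj : f j = v := hrun j hj1 hlt
      simp only [gsA]
      by_cases hv : 0 ≤ v
      · have ht : gwA f n (f j) j 0 ((n - j).toNat) = 0 + (e - j) := by
          rw [hfj]
          exact gwA_run f n v s e hen hrun hstop hv _ j 0 hj1 (by omega) (by omega)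
        rw [ht]
        rw [if_neg (by omega), if_neg (by omega), if_neg (by omega)]
        exact ih (j + 1) (by omega) (by omega) (by omega)
      · have ht : gwA f n (f j) j 0 ((n - j).toNat) = 0 := by
          rw [hfj]
          exact gwA_neg f n v (by omega) _ j 0 hfj
        rw [ht]
        rw [if_neg (by omega), if_neg (by omega), if_neg (by omega)]
        exact ih (j + 1) (by omega) (by omega) (by omega)

lemma pyRange_one_nil (a b : Int) (h : b ≤ a) : PySem.List.pyRange a b 1 = [] := by
  rw [PySem.List.pyRange_one]
  have : (b - a).toNat = 0 := by omega
  simp [this]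

lemma mainA_eq_B (f : Int → Int) (n : Int) (hn : 0 ≤ n) :
    ∀ (fuel : Nat) (s : Int), 0 ≤ s → (n - s).toNat ≤ fuel →
      gsA f n (PySem.List.pyRange s n 1) =
        Option.map (fun p : Int × Int => if p.2 = 3 then (10 : Int) else if p.2 = 4 then 20 else 30)
          (findRunB (lineOf f n) s fuel) := by
  intro fuel
  induction fuel with
  | zero =>
    intro s h0 hf
    rw [pyRange_one_nil s n (by omega)]
    simp [gsA, findRunB]
  | succ m ih =>
    intro s h0 hf
    have hlen : (((lineOf f n).length : Int)) = n := by rw [length_lineOf]; omega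
    simp only [findRunB]
    by_cases hs : s < n
    · rw [if_pos (by rw [hlen]; exact hs)]
      have hget : (PySem.List.pyGet? (lineOf f n) s).getD 0 = f s := get_lineOf f n s h0 hs
      rw [hget]
      set v := f s with hv
      set e := growB (lineOf f n) v (s + 1) (lineOf f n).length with hedef
      obtain ⟨h1, h2, h3, h4⟩ :=
        growB_spec f n v (lineOf f n).length (s + 1) (by omega) (by omega)
          (by rw [length_lineOf]; omega)
      have hrun : ∀ k, s ≤ k → k < e → f k = v := by
        intro k hk1 hk2
        rcases eq_or_lt_of_le hk1 with rfl | hlt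
        · rfl
        · exact h3 k (by omega) hk2
      by_cases hm : 0 ≤ v ∧ 3 ≤ e - s
      · rw [if_pos (by exact ⟨hm.1, by omega⟩)]
        rw [PySem.List.pyRange_one_cons hs]
        simp only [gsA]
        have ht : gwA f n (f s) s 0 ((n - s).toNat) = 0 + (e - s) := by
          rw [← hv]
          exact gwA_run f n v s e h2 hrun h4 hm.1 _ s 0 (le_refl _) (by omega) (by omega)
        rw [ht]
        simp only [Option.map_some]
        split_ifs <;> first | rfl | omega
      · rw [if_neg (by rintro ⟨ha, hb⟩; exact hm ⟨ha, by omega⟩)]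
        rw [gsA_skip f n v s e (by omega) h2 hrun h4 hm ((e - s).toNat) s (le_refl _) (by omega) (by omega)]
        exact ih e (by omega) (by omega)
    · rw [if_neg (by rw [hlen]; omega)]
      rw [pyRange_one_nil s n (by omega)]
      simp [gsA]

lemma rowLoops_eq (g : List (List Int)) (n : Int) (hn : 0 ≤ n) :
    ∀ is, rowILoopA g n is = rowLoopB g n is := by
  intro is
  induction is with
  | nil => simp [rowILoopA, rowLoopB]
  | cons i is ih =>
    simp only [rowILoopA, rowLoopB]
    have hline : rowLineB g n i = lineOf (fun k => pvCell g i k) n := rfl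
    have hmain : rowJLoopA g n i (PySem.List.pyRange 0 n 1) =
        Option.map (fun p : Int × Int => if p.2 = 3 then (10 : Int) else if p.2 = 4 then 20 else 30)
          (findRunB (rowLineB g n i) 0 (rowLineB g n i).length) := by
      rw [rowJLoopA_eq_gsA, hline]
      exact mainA_eq_B (fun k => pvCell g i k) n hn _ 0 (le_refl _)
        (by rw [length_lineOf]; omega)
    rw [hmain]
    cases h : findRunB (rowLineB g n i) 0 (rowLineB g n i).length with
    | none => simpa using ih
    | some p => cases p; simp

lemma colLoops_eq (g : List (List Int)) (n : Int) (hn : 0 ≤ n) :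
    ∀ is, colILoopA g n is = colLoopB g n is := by
  intro is
  induction is with
  | nil => simp [colILoopA, colLoopB]
  | cons i is ih =>
    simp only [colILoopA, colLoopB]
    have hline : colLineB g n i = lineOf (fun k => pvCell g k i) n := rfl
    have hmain : colJLoopA g n i (PySem.List.pyRange 0 n 1) =
        Option.map (fun p : Int × Int => if p.2 = 3 then (10 : Int) else if p.2 = 4 then 20 else 30)
          (findRunB (colLineB g n i) 0 (colLineB g n i).length) := by
      rw [colJLoopA_eq_gsA, hline]
      exact mainA_eq_B (fun k => pvCell g k i) n hn _ 0 (le_refl _)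
        (by rw [length_lineOf]; omega)
    rw [hmain]
    cases h : findRunB (colLineB g n i) 0 (colLineB g n i).length with
    | none => simpa using ih
    | some p => cases p; simp

-- ===== VERDICT (by name: the statement is the Claim_ definition above) =====
theorem gridSolve_spec : Claim_equal_gridSolve := by
  unfold Claim_equal_gridSolve
  intro grid n _ _
  unfold Spec_gridSolve gridSolve gridSolve_alt altGoB
  by_cases hn : 0 ≤ n
  · have hmax : max n 0 = n := by omega
    rw [hmax, rowLoops_eq grid n hn, colLoops_eq grid n hn]
  · have hmax : max n 0 = 0 := by omega
    rw [hmax, pyRange_one_nil 0 n (by omega), pyRange_one_nil 0 0 (by omega)]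
    simp [rowILoopA, colILoopA, rowLoopB, colLoopB]
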